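-- pv_equiv track=rewrite | github.com/HasanVerses/batch_sequencing_optimization | opt/io/local.py | swaps_from_sequence
-- ===== SOURCE A (Python) =====
-- def swaps_from_sequence(sequence):
--     """
--     Convert a sequence of reslotting 'moves' to a list of output swaps
--     Also does an extra check on the validity of the swap list before saving
--     """
--     assert len(sequence)%4 == 0, "Input should be a list of A --> B, B --> A transitions"
--
--     pick_phrase = "Pick item from "
--     place_phrase = "in "
--     warning = "Data in wrong format for swap list (items out of place)"
--
--     bin_A_column = []
--     bin_B_column = []
--
--     counter = 0
--     item = None
--
--     for move in sequence:
--         if counter == 4: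
--             counter = 0
--         if move[:15] == pick_phrase:
--             last_item = item
--             item = move.split(pick_phrase)[1]
--             if counter == 0:
--                 bin_A_column.append(item)
--                 removed_item = item
--             elif counter == 2:
--                 assert last_item == item
--             elif counter == 3:
--                 assert False, warning
--         elif place_phrase in move:
--             item = move.split(place_phrase)[1]
--             if counter == 1:
--                 assert removed_item != item
--                 bin_B_column.append(item)
--             elif counter == 2:
--                 assert False, warning
--         counter += 1
--
--     return bin_A_column, bin_B_column
-- ===== SOURCE B (Python) =====
-- def swaps_from_sequence(sequence):
--     """
--     Convert a sequence of reslotting 'moves' to a list of output swaps.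
--     Positional re-reading: in a well-formed sequence the picks recorded in
--     bin_A_column sit at positions == 0 (mod 4) and the places recorded in
--     bin_B_column at positions == 1 (mod 4); collect them directly by index,
--     with no counter/state machine.
--     """
--     assert len(sequence) % 4 == 0, "Input should be a list of A --> B, B --> A transitions"
--
--     pick_phrase = "Pick item from "
--     place_phrase = "in "
--
--     bin_A_column = [m.split(pick_phrase)[1] for i, m in enumerate(sequence)
--                     if i % 4 == 0 and m.startswith(pick_phrase)]
--     bin_B_column = [m.split(place_phrase)[1] for i, m in enumerate(sequence)
--                     if i % 4 == 1 and not m.startswith(pick_phrase) and place_phrase in m]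
--
--     return bin_A_column, bin_B_column
-- ===== Notes on version B (the rewrite author's own statement) =====
-- stated objective: simpler
-- what changed: Replaces A's stateful single loop (modular counter, item/last_item/removed_item state and in-loop validity asserts) with two direct comprehensions that pick out the moves at positions 0 and 1 modulo 4; on inputs passing A's checks (= Pre_) the outputs coincide.
import Mathlib
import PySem

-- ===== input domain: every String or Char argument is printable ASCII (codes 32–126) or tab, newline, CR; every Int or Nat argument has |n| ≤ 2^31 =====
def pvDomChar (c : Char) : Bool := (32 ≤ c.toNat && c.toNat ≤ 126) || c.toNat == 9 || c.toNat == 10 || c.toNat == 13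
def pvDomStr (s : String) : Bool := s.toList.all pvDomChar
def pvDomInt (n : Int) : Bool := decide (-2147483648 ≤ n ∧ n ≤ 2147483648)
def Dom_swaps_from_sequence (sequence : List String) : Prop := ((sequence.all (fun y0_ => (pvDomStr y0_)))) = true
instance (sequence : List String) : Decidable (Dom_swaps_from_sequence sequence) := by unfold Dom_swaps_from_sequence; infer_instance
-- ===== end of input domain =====

-- B replaces A's stateful counter loop by two positional comprehensions (simpler); equal on Pre_ (the inputs where A returns).

-- shared phrase constants and the parse expressions both Pythons use verbatim
def pickPhrase : String := "Pick item from "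
def placePhrase : String := "in "
-- move.split(pick_phrase)[1]; index 1 exists whenever the phrase occurs in move (comment: .getD is only reached with ≥ 2 parts)
def pPick (m : String) : String := ((PySem.Str.split? m pickPhrase).getD []).getD 1 ""
-- move.split(place_phrase)[1]; same remark
def pPlace (m : String) : String := ((PySem.Str.split? m placePhrase).getD []).getD 1 ""

-- ===== PORT A =====
-- move[:15] == pick_phrase
def isPickA (m : String) : Bool := PySem.Str.slice m none (some 15) == pickPhrase
-- place_phrase in move
def isPlace (m : String) : Bool := PySem.Str.isIn placePhrase m

-- the for-loop of A; state = (counter, item, removed_item, bin_A_column, bin_B_column);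
-- `none` = the iteration raises (a failed assert, or UnboundLocalError on removed_item)
def loopA : List String → Int → Option String → Option String → List String → List String →
    Option (List String × List String)
  | [], _, _, _, aCol, bCol => some (aCol, bCol)
  | move :: rest, counter, item, removed, aCol, bCol =>
    let counter := if counter == 4 then 0 else counter
    if isPickA move then
      let last_item := item
      let it := pPick move
      if counter == 0 then
        loopA rest (counter + 1) (some it) (some it) (aCol ++ [it]) bCol
      else if counter == 2 then
        if last_item == some it then loopA rest (counter + 1) (some it) removed aCol bCol
        else none                    -- assert last_item == item fails
      else if counter == 3 then none -- assert False
      else loopA rest (counter + 1) (some it) removed aCol bCol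
    else if isPlace move then
      let it := pPlace move
      if counter == 1 then
        match removed with
        | none => none               -- UnboundLocalError: removed_item unbound
        | some r =>
          if r == it then none       -- assert removed_item != item fails
          else loopA rest (counter + 1) (some it) removed aCol (bCol ++ [it])
      else if counter == 2 then none -- assert False
      else loopA rest (counter + 1) (some it) removed aCol bCol
    else loopA rest (counter + 1) item removed aCol bCol

def swaps_from_sequence (sequence : List String) : List String × List String :=
  if (sequence.length : Int) % 4 == 0 then
    (loopA sequence 0 none none [] []).getD ([], [])   -- inside Pre_ the loop never raises
  else ([], [])                                        -- assert len%4 fails: outside Pre_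

-- ===== PORT B =====
-- m.startswith(pick_phrase)
def isPickB (m : String) : Bool := PySem.Str.startswith m pickPhrase

def swaps_from_sequence_alt (sequence : List String) : List String × List String :=
  if (sequence.length : Int) % 4 == 0 then
    let e := PySem.List.enumerate sequence
    ((e.filter (fun p => p.1 % 4 == 0 && isPickB p.2)).map (fun p => pPick p.2),
     (e.filter (fun p => p.1 % 4 == 1 && (!isPickB p.2 && isPlace p.2))).map (fun p => pPlace p.2))
  else ([], [])                                        -- assert len%4 fails: outside Pre_

-- ===== PRECONDITION & SPEC =====
-- helpers describing the loop-carried values A's asserts read, as scans of the prefix of moves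
def parseOf (m : String) : Option String :=
  if isPickB m then some (pPick m) else if isPlace m then some (pPlace m) else none

-- the `item` variable after processing `moves` (last move that parsed)
def lastItemOf (moves : List String) : Option String :=
  moves.foldl (fun acc m => (parseOf m).or acc) none

-- the `removed_item` variable after processing `moves` (last pick at a position ≡ 0 mod 4); none = unbound
def removedOf (moves : List String) : Option String :=
  (PySem.List.enumerate moves).foldl
    (fun acc p => if p.1 % 4 == 0 && isPickB p.2 then some (pPick p.2) else acc) none

-- position i of s does not make A raise
def okAt (s : List String) (i : Nat) : Bool :=
  let m := s.getD i ""
  if i % 4 == 3 then !isPickB m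
  else if i % 4 == 2 then
    if isPickB m then lastItemOf (s.take i) == some (pPick m) else !isPlace m
  else if i % 4 == 1 then
    if !isPickB m && isPlace m then
      match removedOf (s.take i) with
      | none => false
      | some r => !(r == pPlace m)
    else true
  else true

-- Pre_ = exactly the inputs on which A returns: length divisible by 4 and no position trips an
-- assert (pick at ≡3; misplaced place at ≡2; pick at ≡2 not matching the previous item;
-- place at ≡1 whose item equals, or precedes any binding of, removed_item)
def Pre_swaps_from_sequence (sequence : List String) : Prop :=
  sequence.length % 4 = 0 ∧ ∀ i < sequence.length, okAt sequence i = true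
instance (sequence : List String) : Decidable (Pre_swaps_from_sequence sequence) := by
  unfold Pre_swaps_from_sequence; infer_instance

def pvWitness_swaps_from_sequence : List String :=
  ["Pick item from X", "place in Y", "Pick item from Y", "place in X"]

def Spec_swaps_from_sequence (sequence : List String) (out : List String × List String) : Prop := out = swaps_from_sequence_alt sequence
instance (sequence : List String) (out : List String × List String) : Decidable (Spec_swaps_from_sequence sequence out) := by unfold Spec_swaps_from_sequence; infer_instance

-- ===== CLAIM (what is proved, stated in full; the proofs are below) =====
def Claim_equal_swaps_from_sequence : Prop := ∀ (sequence : List String), Dom_swaps_from_sequence sequence → Pre_swaps_from_sequence sequence → Spec_swaps_from_sequence sequence (swaps_from_sequence sequence)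

-- ===== LEMMAS AND PROOFS =====

theorem pickPhrase_len : pickPhrase.toList.length = 15 := by decide

theorem slice15_toList (m : String) :
    (PySem.Str.slice m none (some 15)).toList = m.toList.take 15 := by
  rw [PySem.Str.toList_slice, PySem.Chars.slice_eq_listSlice]
  rw [show ((15 : Int)) = ((15 : Nat) : Int) by norm_num, PySem.List.slice_to_natCast]

theorem isPickA_eq (m : String) : isPickA m = isPickB m := by
  unfold isPickA isPickB
  rw [Bool.eq_iff_iff, beq_iff_eq, PySem.Str.startswith_eq, PySem.Chars.startswith_iff]
  constructor
  · intro h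
    rw [List.prefix_iff_eq_take, pickPhrase_len, ← slice15_toList, h]
  · intro h
    apply String.toList_injective
    rw [slice15_toList]
    have := List.prefix_iff_eq_take.mp h
    rw [pickPhrase_len] at this
    exact this.symm

-- the two columns B collects, as index-carrying recursions (proof-side bridge)
def colA (i : Nat) : List String → List String
  | [] => []
  | m :: r => (if i % 4 == 0 && isPickB m then [pPick m] else []) ++ colA (i + 1) r

def colB (i : Nat) : List String → List String
  | [] => []
  | m :: r => (if i % 4 == 1 && (!isPickB m && isPlace m) then [pPlace m] else []) ++ colB (i + 1) r

theorem lastItemOf_append_one (pre : List String) (m : String) :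
    lastItemOf (pre ++ [m]) = (parseOf m).or (lastItemOf pre) := by
  simp [lastItemOf, List.foldl_append]

theorem removedOf_append_one (pre : List String) (m : String) :
    removedOf (pre ++ [m]) =
      if (pre.length : Int) % 4 == 0 && isPickB m then some (pPick m) else removedOf pre := by
  simp [removedOf, PySem.List.enumerate_append, List.foldl_append, PySem.List.enumerate_cons,
    PySem.List.enumerate_nil]

theorem loopA_run : ∀ (s pre : List String) (c : Int) (aCol bCol : List String),
    (if c == 4 then 0 else c) = ((pre.length % 4 : Nat) : Int) →
    (∀ i < s.length, okAt (pre ++ s) (pre.length + i) = true) →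
    loopA s c (lastItemOf pre) (removedOf pre) aCol bCol
      = some (aCol ++ colA pre.length s, bCol ++ colB pre.length s) := by
  intro s
  induction s with
  | nil => intro pre c aCol bCol _ _; simp [loopA, colA, colB]
  | cons m r ih =>
    intro pre c aCol bCol hc hok
    have hm : (pre ++ m :: r).getD pre.length "" = m := by
      simp [List.getD]
    have htake : (pre ++ m :: r).take pre.length = pre := List.take_left
    have hlen1 : (pre ++ [m]).length = pre.length + 1 := by simp
    have hok0 : okAt (pre ++ m :: r) pre.length = true := by
      have := hok 0 (by simp)
      simpa using this
    have hokS : ∀ i < r.length, okAt ((pre ++ [m]) ++ r) ((pre ++ [m]).length + i) = true := by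
      intro i hi
      have := hok (i + 1) (by simp; omega)
      have he : (pre ++ [m]) ++ r = pre ++ m :: r := by simp
      rw [he, hlen1]
      have harith : pre.length + 1 + i = pre.length + (i + 1) := by omega
      rw [harith]
      exact this
    have step : ∀ (c' : Int) (aC bC : List String),
        (if c' == 4 then 0 else c') = (((pre.length + 1) % 4 : Nat) : Int) →
        loopA r c' (lastItemOf (pre ++ [m])) (removedOf (pre ++ [m])) aC bC
          = some (aC ++ colA (pre.length + 1) r, bC ++ colB (pre.length + 1) r) := by
      intro c' aC bC hcc
      have := ih (pre ++ [m]) c' aC bC (by rw [hlen1]; exact hcc) hokS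
      rwa [hlen1] at this
    have hk4 : pre.length % 4 < 4 := Nat.mod_lt _ (by norm_num)
    have hkcases : pre.length % 4 = 0 ∨ pre.length % 4 = 1 ∨ pre.length % 4 = 2 ∨
        pre.length % 4 = 3 := by omega
    simp only [loopA]
    rw [isPickA_eq]
    rw [hc]
    rcases hkcases with hk | hk | hk | hk
    -- k = 0 : a pick appends to column A and binds removed_item
    · rw [hk]
      by_cases hp : isPickB m
      · have hli : lastItemOf (pre ++ [m]) = some (pPick m) := by
          rw [lastItemOf_append_one]; simp [parseOf, hp]
        have hrm : removedOf (pre ++ [m]) = some (pPick m) := by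
          rw [removedOf_append_one]
          have : ((pre.length : Int) % 4 == 0) = true := by simp; omega
          simp [this, hp]
        have hs := step 1 (aCol ++ [pPick m]) bCol (by norm_num; omega)
        rw [hli, hrm] at hs
        simp only [hp, if_true]
        norm_num
        rw [hs]
        have hca : colA pre.length (m :: r) = [pPick m] ++ colA (pre.length + 1) r := by
          simp [colA, hk, hp]
        have hcb : colB pre.length (m :: r) = colB (pre.length + 1) r := by
          simp [colB, hk]
        rw [hca, hcb]
        simp
      · by_cases hq : isPlace m
        · have hli : lastItemOf (pre ++ [m]) = some (pPlace m) := by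
            rw [lastItemOf_append_one]; simp [parseOf, hp, hq]
          have hrm : removedOf (pre ++ [m]) = removedOf pre := by
            rw [removedOf_append_one]; simp [hp]
          have hs := step 1 aCol bCol (by norm_num; omega)
          rw [hli, hrm] at hs
          simp only [hp, hq]
          norm_num
          rw [hs]
          have hca : colA pre.length (m :: r) = colA (pre.length + 1) r := by
            simp [colA, hp]
          have hcb : colB pre.length (m :: r) = colB (pre.length + 1) r := by
            simp [colB, hk]
          rw [hca, hcb]
        · have hli : lastItemOf (pre ++ [m]) = lastItemOf pre := by
            rw [lastItemOf_append_one]; simp [parseOf, hp, hq]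
          have hrm : removedOf (pre ++ [m]) = removedOf pre := by
            rw [removedOf_append_one]; simp [hp]
          have hs := step 1 aCol bCol (by norm_num; omega)
          rw [hli, hrm] at hs
          simp only [hp, hq]
          norm_num
          rw [hs]
          have hca : colA pre.length (m :: r) = colA (pre.length + 1) r := by
            simp [colA, hp]
          have hcb : colB pre.length (m :: r) = colB (pre.length + 1) r := by
            simp [colB, hk]
          rw [hca, hcb]
    -- k = 1 : a non-pick place appends to column B (okAt rules out the raising cases)
    · rw [hk]
      simp only [okAt, hm, htake, hk] at hok0
      norm_num at hok0
      by_cases hp : isPickB m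
      · have hli : lastItemOf (pre ++ [m]) = some (pPick m) := by
          rw [lastItemOf_append_one]; simp [parseOf, hp]
        have hrm : removedOf (pre ++ [m]) = removedOf pre := by
          rw [removedOf_append_one]
          have : ((pre.length : Int) % 4 == 0) = false := by simp; omega
          simp [this]
        have hs := step 2 aCol bCol (by norm_num; omega)
        rw [hli, hrm] at hs
        simp only [hp]
        norm_num
        rw [hs]
        have hca : colA pre.length (m :: r) = colA (pre.length + 1) r := by
          simp [colA, hk]
        have hcb : colB pre.length (m :: r) = colB (pre.length + 1) r := by
          simp [colB, hp, hk]
        rw [hca, hcb]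
      · by_cases hq : isPlace m
        · simp only [hp, hq] at hok0
          norm_num at hok0
          cases hrv : removedOf pre with
          | none => rw [hrv] at hok0; simp at hok0
          | some rv =>
            rw [hrv] at hok0
            have hne : (rv == pPlace m) = false := by simpa using hok0
            have hli : lastItemOf (pre ++ [m]) = some (pPlace m) := by
              rw [lastItemOf_append_one]; simp [parseOf, hp, hq]
            have hrm : removedOf (pre ++ [m]) = some rv := by
              rw [removedOf_append_one]; simp [hp, hrv]
            have hs := step 2 aCol (bCol ++ [pPlace m]) (by norm_num; omega)
            rw [hli, hrm] at hs
            simp only [hp, hq]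
            norm_num [hne]
            rw [hs]
            have hca : colA pre.length (m :: r) = colA (pre.length + 1) r := by
              simp [colA, hp]
            have hcb : colB pre.length (m :: r) = [pPlace m] ++ colB (pre.length + 1) r := by
              simp [colB, hp, hq, hk]
            rw [hca, hcb]
            simp
        · have hli : lastItemOf (pre ++ [m]) = lastItemOf pre := by
            rw [lastItemOf_append_one]; simp [parseOf, hp, hq]
          have hrm : removedOf (pre ++ [m]) = removedOf pre := by
            rw [removedOf_append_one]; simp [hp]
          have hs := step 2 aCol bCol (by norm_num; omega)
          rw [hli, hrm] at hs
          simp only [hp, hq]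
          norm_num
          rw [hs]
          have hca : colA pre.length (m :: r) = colA (pre.length + 1) r := by
            simp [colA, hp]
          have hcb : colB pre.length (m :: r) = colB (pre.length + 1) r := by
            simp [colB, hq]
          rw [hca, hcb]
    -- k = 2 : a pick must match the previous item (okAt), nothing appended
    · rw [hk]
      simp only [okAt, hm, htake, hk] at hok0
      norm_num at hok0
      by_cases hp : isPickB m
      · simp only [hp] at hok0
        norm_num at hok0
        have hli0 : lastItemOf pre = some (pPick m) := hok0
        have hli : lastItemOf (pre ++ [m]) = some (pPick m) := by
          rw [lastItemOf_append_one]; simp [parseOf, hp]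
        have hrm : removedOf (pre ++ [m]) = removedOf pre := by
          rw [removedOf_append_one]
          have : ((pre.length : Int) % 4 == 0) = false := by simp; omega
          simp [this]
        have hs := step 3 aCol bCol (by norm_num; omega)
        rw [hli, hrm] at hs
        simp only [hp, hli0]
        norm_num
        rw [hs]
        have hca : colA pre.length (m :: r) = colA (pre.length + 1) r := by
          simp [colA, hk]
        have hcb : colB pre.length (m :: r) = colB (pre.length + 1) r := by
          simp [colB, hk]
        rw [hca, hcb]
      · by_cases hq : isPlace m
        · simp [hp, hq] at hok0
        · have hli : lastItemOf (pre ++ [m]) = lastItemOf pre := by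
            rw [lastItemOf_append_one]; simp [parseOf, hp, hq]
          have hrm : removedOf (pre ++ [m]) = removedOf pre := by
            rw [removedOf_append_one]; simp [hp]
          have hs := step 3 aCol bCol (by norm_num; omega)
          rw [hli, hrm] at hs
          simp only [hp, hq]
          norm_num
          rw [hs]
          have hca : colA pre.length (m :: r) = colA (pre.length + 1) r := by
            simp [colA, hp]
          have hcb : colB pre.length (m :: r) = colB (pre.length + 1) r := by
            simp [colB, hq]
          rw [hca, hcb]
    -- k = 3 : okAt rules a pick out; a place only updates item
    · rw [hk]
      simp only [okAt, hm, htake, hk] at hok0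
      norm_num at hok0
      have hp : isPickB m = false := by simpa using hok0
      have hrm : removedOf (pre ++ [m]) = removedOf pre := by
        rw [removedOf_append_one]; simp [hp]
      by_cases hq : isPlace m
      · have hli : lastItemOf (pre ++ [m]) = some (pPlace m) := by
          rw [lastItemOf_append_one]; simp [parseOf, hp, hq]
        have hs := step 4 aCol bCol (by norm_num; omega)
        rw [hli, hrm] at hs
        simp only [hp, hq]
        norm_num
        rw [hs]
        have hca : colA pre.length (m :: r) = colA (pre.length + 1) r := by
          simp [colA, hp]
        have hcb : colB pre.length (m :: r) = colB (pre.length + 1) r := by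
          simp [colB, hq, hk]
        rw [hca, hcb]
      · have hli : lastItemOf (pre ++ [m]) = lastItemOf pre := by
          rw [lastItemOf_append_one]; simp [parseOf, hp, hq]
        have hs := step 4 aCol bCol (by norm_num; omega)
        rw [hli, hrm] at hs
        simp only [hp, hq]
        norm_num
        rw [hs]
        have hca : colA pre.length (m :: r) = colA (pre.length + 1) r := by
          simp [colA, hp]
        have hcb : colB pre.length (m :: r) = colB (pre.length + 1) r := by
          simp [colB, hq]
        rw [hca, hcb]

theorem colA_eq (s : List String) (i : Nat) :
    ((PySem.List.enumerate s (i : Int)).filter (fun p => p.1 % 4 == 0 && isPickB p.2)).map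
        (fun p => pPick p.2) = colA i s := by
  induction s generalizing i with
  | nil => simp [colA, PySem.List.enumerate_nil]
  | cons m r ih =>
    rw [PySem.List.enumerate_cons, List.filter_cons]
    have ih' := ih (i + 1)
    have hcast : (((i + 1 : Nat)) : Int) = (i : Int) + 1 := by push_cast; ring
    rw [hcast] at ih'
    by_cases h : i % 4 = 0
    · have hd : (4 : Int) ∣ (i : Int) := by omega
      by_cases hp : isPickB m <;> simp [colA, h, hp, hd, ih']
    · have hd : ¬ (4 : Int) ∣ (i : Int) := by omega
      simp [colA, h, hd, ih']

theorem colB_eq (s : List String) (i : Nat) :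
    ((PySem.List.enumerate s (i : Int)).filter
          (fun p => p.1 % 4 == 1 && (!isPickB p.2 && isPlace p.2))).map
        (fun p => pPlace p.2) = colB i s := by
  induction s generalizing i with
  | nil => simp [colB, PySem.List.enumerate_nil]
  | cons m r ih =>
    rw [PySem.List.enumerate_cons, List.filter_cons]
    have ih' := ih (i + 1)
    have hcast : (((i + 1 : Nat)) : Int) = (i : Int) + 1 := by push_cast; ring
    rw [hcast] at ih'
    by_cases h : i % 4 = 1
    · have hd : (i : Int) % 4 = 1 := by omega
      by_cases hp : isPickB m <;> by_cases hq : isPlace m <;> simp [colB, h, hp, hq, hd, ih']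
    · have hd : ¬ (i : Int) % 4 = 1 := by omega
      simp [colB, h, hd, ih']

-- ===== VERDICT (by name: the statement is the Claim_ definition above) =====
theorem swaps_from_sequence_spec : Claim_equal_swaps_from_sequence := by
  intro s _ hpre
  obtain ⟨hlen, hok⟩ := hpre
  unfold Spec_swaps_from_sequence swaps_from_sequence swaps_from_sequence_alt
  have hlen' : ((s.length : Int) % 4 == 0) = true := by
    simp only [beq_iff_eq]
    omega
  rw [hlen']
  simp only [if_true]
  have h := loopA_run s [] 0 [] [] (by simp) (by simpa using hok)
  simp only [lastItemOf, removedOf, List.foldl_nil, List.nil_append, List.length_nil,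
    PySem.List.enumerate_nil] at h
  rw [h]
  have hA := colA_eq s 0
  have hB := colB_eq s 0
  norm_num at hA hB
  rw [Option.getD_some, ← hA, ← hB]
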